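-- pv_equiv track=rewrite | github.com/kiwertenok-ship-it/python.labs | lab1/task1/task.py | find_multiply
-- ===== SOURCE A (Python) =====
-- def find_multiply(num):
--     def sum_digits(number):
--         sum_ = 0
--         while number > 0:
--             sum_ += number % 10
--             number //= 10
--         return sum_
--
--     sum_digit_num = sum_digits(num)
--     sum_digit_divs = 0
--     multi_digit_divs = 1
--     for div in range(1, num + 1):
--         if num % div == 0:
--             sum_digit_div = sum_digits(div)
--             if sum_digit_divs + sum_digit_div >= sum_digit_num:
--                 break
--             multi_digit_divs *= div
--     return multi_digit_divs
-- ===== SOURCE B (Python) =====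
-- def find_multiply(num):
--     def sum_digits(n):
--         s = 0
--         while n > 0:
--             s += n % 10
--             n //= 10
--         return s
--
--     if num <= 0:
--         return 1
--     divs = set()
--     i = 1
--     while i * i <= num:
--         if num % i == 0:
--             divs.add(i)
--             divs.add(num // i)
--         i += 1
--     target = sum_digits(num)
--     prod = 1
--     for d in sorted(divs):
--         if sum_digits(d) >= target:
--             break
--         prod *= d
--     return prod
-- ===== Notes on version B (the rewrite author's own statement) =====
-- stated objective: alternative
-- what changed: B enumerates divisors by sqrt(num) factor pairs into a set and sorts them instead of testing every candidate in range(1, num+1), then applies the same digit-sum break loop over the ascending divisors; intended as faster (measured 23.83x median at the largest size, but inconsistent since A's loop often breaks early), so no speed is claimed.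
import Mathlib
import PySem

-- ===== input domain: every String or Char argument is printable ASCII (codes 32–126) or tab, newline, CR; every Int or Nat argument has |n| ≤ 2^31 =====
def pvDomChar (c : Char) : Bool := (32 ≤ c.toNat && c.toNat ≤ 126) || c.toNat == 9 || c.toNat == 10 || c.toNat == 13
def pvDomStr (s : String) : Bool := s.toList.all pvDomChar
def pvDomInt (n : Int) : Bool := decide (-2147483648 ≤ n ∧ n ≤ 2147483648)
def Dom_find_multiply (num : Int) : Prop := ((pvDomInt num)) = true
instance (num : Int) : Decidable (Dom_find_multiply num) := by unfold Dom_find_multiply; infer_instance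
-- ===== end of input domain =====

-- B replaces A's scan of every candidate in range(1, num+1) by enumerating divisor pairs up
-- to √num into a set, sorting them, and applying the same break loop (an alternative algorithm;
-- wall-clock gain depends on how early the break fires, so no speed is claimed).

-- ===== PORT A =====
-- sum_digits helper (identical in both Pythons): accumulator loop 'while n > 0'.
def sumDigits (n : Int) (acc : Int) : Int :=
  if _h : 0 < n then sumDigits (PySem.Int.floordiv n 10) (acc + PySem.Int.mod n 10)
  else acc
termination_by n.toNat
decreasing_by
  have := PySem.Int.floordiv_eq_ediv_of_pos (a := n) (b := 10) (by omega)
  rw [this]; omega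

-- the 'for div in range(1, num+1)' loop with its break; sdd is A's never-updated sum_digit_divs
def goA (num s sdd : Int) : List Int → Int → Int
  | [], m => m
  | d :: rest, m =>
    if PySem.Int.mod num d == 0 then
      if sdd + sumDigits d 0 ≥ s then m
      else goA num s sdd rest (m * d)
    else goA num s sdd rest m

def find_multiply (num : Int) : Int :=
  goA num (sumDigits num 0) 0 (PySem.List.pyRange 1 (num + 1) 1) 1

-- ===== PORT B =====
-- 'while i*i <= num: collect i and num//i into the set'
def collectDivs (num : Int) (i : Int) (acc : PySem.Set Int) : PySem.Set Int :=
  if h : i * i ≤ num then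
    if PySem.Int.mod num i == 0 then
      collectDivs num (i + 1) (PySem.Set.add (PySem.Set.add acc i) (PySem.Int.floordiv num i))
    else collectDivs num (i + 1) acc
  else acc
termination_by (num + 1 - i).toNat
decreasing_by
  all_goals
    have hi : i ≤ num := by
      by_cases h0 : i ≤ 0
      · have : (0:Int) ≤ i * i := mul_self_nonneg i
        omega
      · have : i ≤ i * i := le_mul_of_one_le_left (by omega) (by omega)
        omega
  all_goals omega

-- 'for d in sorted(divs): if sum_digits(d) >= target: break; prod *= d'
def goB (s : Int) : List Int → Int → Int
  | [], m => m
  | d :: rest, m => if sumDigits d 0 ≥ s then m else goB s rest (m * d)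

def find_multiply_alt (num : Int) : Int :=
  if num ≤ 0 then 1
  else
    goB (sumDigits num 0)
      (PySem.List.sorted (collectDivs num 1 PySem.Set.empty) (fun x => x) false) 1

-- ===== PRECONDITION & SPEC =====
def Spec_find_multiply (num : Int) (out : Int) : Prop := out = find_multiply_alt num
instance (num : Int) (out : Int) : Decidable (Spec_find_multiply num out) := by unfold Spec_find_multiply; infer_instance

-- ===== CLAIM (what is proved, stated in full; the proofs are below) =====
def Claim_equal_find_multiply : Prop := ∀ (num : Int), Dom_find_multiply num → Spec_find_multiply num (find_multiply num)

-- ===== LEMMAS AND PROOFS =====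

-- A's loop over the full range, with its divisibility test, is B's loop over the filtered list.
theorem goA_eq_goB (num s : Int) (l : List Int) (m : Int) :
    goA num s 0 l m = goB s (l.filter (fun d => PySem.Int.mod num d == 0)) m := by
  induction l generalizing m with
  | nil => rfl
  | cons d rest ih =>
    by_cases h : PySem.Int.mod num d == 0
    · simp [goA, goB, h, zero_add, ih]
    · simp [goA, h, ih]

-- membership in the set built by the √num sweep
theorem mem_collectDivs (num d : Int) :
    ∀ (i : Int) (acc : PySem.Set Int), 1 ≤ i →
      (d ∈ collectDivs num i acc ↔
        d ∈ acc ∨ ∃ j, i ≤ j ∧ j * j ≤ num ∧ PySem.Int.mod num j = 0 ∧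
          (d = j ∨ d = PySem.Int.floordiv num j)) := by
  intro i acc
  induction i, acc using collectDivs.induct num with
  | case1 i acc hle hdvd ih =>
    intro hi
    have hmod : PySem.Int.mod num i = 0 := by simpa using hdvd
    rw [collectDivs, dif_pos hle, if_pos hdvd, ih (by omega),
        PySem.Set.mem_add, PySem.Set.mem_add]
    constructor
    · rintro (((h | h) | h) | ⟨j, hj1, hj2, hj3, hj4⟩)
      · exact Or.inl h
      · exact Or.inr ⟨i, le_refl i, hle, hmod, Or.inl h⟩
      · exact Or.inr ⟨i, le_refl i, hle, hmod, Or.inr h⟩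
      · exact Or.inr ⟨j, by omega, hj2, hj3, hj4⟩
    · rintro (h | ⟨j, hj1, hj2, hj3, hj4⟩)
      · exact Or.inl (Or.inl (Or.inl h))
      · by_cases hji : j = i
        · subst hji
          rcases hj4 with h | h
          · exact Or.inl (Or.inl (Or.inr h))
          · exact Or.inl (Or.inr h)
        · exact Or.inr ⟨j, by omega, hj2, hj3, hj4⟩
  | case2 i acc hle hdvd ih =>
    intro hi
    have hmod : PySem.Int.mod num i ≠ 0 := by simpa using hdvd
    rw [collectDivs, dif_pos hle, if_neg hdvd, ih (by omega)]
    constructor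
    · rintro (h | ⟨j, hj1, hj2, hj3, hj4⟩)
      · exact Or.inl h
      · exact Or.inr ⟨j, by omega, hj2, hj3, hj4⟩
    · rintro (h | ⟨j, hj1, hj2, hj3, hj4⟩)
      · exact Or.inl h
      · by_cases hji : j = i
        · subst hji; exact absurd hj3 hmod
        · exact Or.inr ⟨j, by omega, hj2, hj3, hj4⟩
  | case3 i acc hle =>
    intro hi
    rw [collectDivs, dif_neg hle]
    constructor
    · exact Or.inl
    · rintro (h | ⟨j, hj1, hj2, hj3, hj4⟩)
      · exact h
      · exfalso
        have : i * i ≤ j * j := mul_le_mul hj1 hj1 (by omega) (by omega)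
        omega

theorem nodup_collectDivs (num : Int) :
    ∀ (i : Int) (acc : PySem.Set Int), acc.Nodup → (collectDivs num i acc).Nodup := by
  intro i acc h
  induction i, acc using collectDivs.induct num with
  | case1 i acc hle hdvd ih =>
    rw [collectDivs, dif_pos hle, if_pos hdvd]
    exact ih (PySem.Set.nodup_add _ _ (PySem.Set.nodup_add _ _ h))
  | case2 i acc hle hdvd ih =>
    rw [collectDivs, dif_pos hle, if_neg hdvd]
    exact ih h
  | case3 i acc hle =>
    rw [collectDivs, dif_neg hle]; exact h

-- number theory: the pair sweep finds exactly the divisors in [1, num]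
theorem pair_characterization (num d : Int) (hnum : 1 ≤ num) :
    (∃ j, 1 ≤ j ∧ j * j ≤ num ∧ PySem.Int.mod num j = 0 ∧
        (d = j ∨ d = PySem.Int.floordiv num j)) ↔
      (1 ≤ d ∧ d < num + 1 ∧ PySem.Int.mod num d = 0) := by
  constructor
  · rintro ⟨j, hj1, hj2, hj3, hj4⟩
    have hjle : j ≤ num := by nlinarith [mul_self_nonneg (j - 1)]
    have hdvdj : j ∣ num := (PySem.Int.mod_eq_zero_iff_dvd num j).1 hj3
    rcases hj4 with rfl | rfl
    · exact ⟨hj1, by omega, hj3⟩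
    · rw [PySem.Int.floordiv_eq_ediv_of_pos (by omega)]
      have hq : num / j * j = num := Int.ediv_mul_cancel hdvdj
      have hq1 : 1 ≤ num / j := by rw [Int.le_ediv_iff_mul_le (by omega)]; omega
      have hqle : num / j ≤ num := Int.ediv_le_self j (by omega)
      refine ⟨hq1, by omega, (PySem.Int.mod_eq_zero_iff_dvd num (num / j)).2 ⟨j, hq.symm⟩⟩
  · rintro ⟨hd1, hd2, hd3⟩
    have hdvd : d ∣ num := (PySem.Int.mod_eq_zero_iff_dvd num d).1 hd3
    by_cases hsq : d * d ≤ num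
    · exact ⟨d, hd1, hsq, hd3, Or.inl rfl⟩
    · have he : num / d * d = num := Int.ediv_mul_cancel hdvd
      have he1 : 1 ≤ num / d := by rw [Int.le_ediv_iff_mul_le (by omega)]; omega
      have hed : num / d < d := by
        have h1 : num / d * d < d * d := by linarith
        exact lt_of_mul_lt_mul_right h1 (by omega)
      have hee : num / d * (num / d) ≤ num := by nlinarith
      refine ⟨num / d, he1, hee,
        (PySem.Int.mod_eq_zero_iff_dvd num (num / d)).2 ⟨d, he.symm⟩, Or.inr ?_⟩
      rw [PySem.Int.floordiv_eq_ediv_of_pos (by omega)]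
      exact ((Int.ediv_eq_iff_eq_mul_left (by omega) ⟨d, he.symm⟩).2
        (by rw [mul_comm]; exact he.symm)).symm

-- the sorted set is exactly A's filtered range
theorem sorted_collect_eq (num : Int) (hnum : 1 ≤ num) :
    PySem.List.sorted (collectDivs num 1 PySem.Set.empty) (fun x => x) false
      = (PySem.List.pyRange 1 (num + 1) 1).filter (fun d => PySem.Int.mod num d == 0) := by
  apply PySem.List.sorted_eq_of_perm_of_pairwise_lt
  · apply (List.perm_ext_iff_of_nodup (List.Nodup.filter _ (PySem.List.nodup_pyRange_one 1 (num+1)))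
      (nodup_collectDivs num 1 PySem.Set.empty List.nodup_nil)).2
    intro d
    rw [List.mem_filter, mem_collectDivs num d 1 PySem.Set.empty (le_refl 1)]
    simp only [PySem.List.mem_pyRange_one, beq_iff_eq, PySem.Set.empty, List.not_mem_nil]
    rw [pair_characterization num d hnum]
    tauto
  · exact List.Pairwise.filter _ (PySem.List.pairwise_lt_pyRange_one 1 (num+1))

-- ===== VERDICT (by name: the statement is the Claim_ definition above) =====
theorem find_multiply_spec : Claim_equal_find_multiply := by
  intro num _
  unfold Spec_find_multiply find_multiply find_multiply_alt
  by_cases hle : num ≤ 0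
  · rw [PySem.List.pyRange_one_eq_nil (by omega)]
    simp [goA, hle]
  · rw [if_neg hle, goA_eq_goB, sorted_collect_eq num (by omega)]
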